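-- pv_equiv track=rewrite | github.com/Saikatriki2004/GeeksforGeeks | June_2024/June_26.py | sumOfCoverage
-- ===== SOURCE A (Python) =====
-- def sumOfCoverage(matrix):
--     n = len(matrix)
--     m = len(matrix[0]) if n > 0 else 0
--     coverage_sum = 0
--
--     # Directions: left, right, up, down
--     directions = [(-1, 0), (1, 0), (0, -1), (0, 1)]
--
--     for i in range(n):
--         for j in range(m):
--             if matrix[i][j] == 0:
--                 for d in directions:
--                     ni, nj = i + d[0], j + d[1]
--                     if 0 <= ni < n and 0 <= nj < m and matrix[ni][nj] == 1:
--                         coverage_sum += 1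
--
--     return coverage_sum
-- ===== SOURCE B (Python) =====
-- def sumOfCoverage(matrix):
--     # Count each undirected 0-1 adjacency once, via right/down edges only.
--     n = len(matrix)
--     m = len(matrix[0]) if n > 0 else 0
--     total = 0
--     for i in range(n):
--         for j in range(m):
--             a = matrix[i][j]
--             if j + 1 < m:
--                 b = matrix[i][j + 1]
--                 if (a == 0 and b == 1) or (a == 1 and b == 0):
--                     total += 1
--             if i + 1 < n:
--                 b = matrix[i + 1][j]
--                 if (a == 0 and b == 1) or (a == 1 and b == 0):
--                     total += 1
--     return total
-- ===== Notes on version B (the rewrite author's own statement) =====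
-- stated objective: alternative
-- what changed: Replaces the per-zero-cell probe of all four neighbours by a single pass that enumerates each undirected adjacent pair once (right and down neighbours only) and adds 1 per genuine 0-1 edge.
import Mathlib
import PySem

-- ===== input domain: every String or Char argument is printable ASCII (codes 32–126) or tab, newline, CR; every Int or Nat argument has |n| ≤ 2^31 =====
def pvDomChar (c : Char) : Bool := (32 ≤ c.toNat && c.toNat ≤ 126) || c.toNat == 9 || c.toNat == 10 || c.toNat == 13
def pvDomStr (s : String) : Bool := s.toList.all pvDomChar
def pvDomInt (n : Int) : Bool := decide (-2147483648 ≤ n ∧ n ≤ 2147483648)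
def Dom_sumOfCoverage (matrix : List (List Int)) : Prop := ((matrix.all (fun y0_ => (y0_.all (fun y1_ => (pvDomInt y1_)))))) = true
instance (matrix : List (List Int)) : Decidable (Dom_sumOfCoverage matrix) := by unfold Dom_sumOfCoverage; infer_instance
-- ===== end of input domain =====

-- B counts each undirected 0-1 adjacency once via a right/down edge scan instead of
-- A's per-zero-cell probe of all four neighbours (alternative decomposition, same cost).


-- ===== PORT A =====
def sumOfCoverage (matrix : List (List Int)) : Int :=
  let n : Int := matrix.length
  let m : Int := if n > 0 then ((PySem.List.pyGetD matrix 0 []).length : Int) else 0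
  let directions : List (Int × Int) := [(-1, 0), (1, 0), (0, -1), (0, 1)]
  (PySem.List.pyRange 0 n 1).foldl (fun acc i =>
    (PySem.List.pyRange 0 m 1).foldl (fun acc j =>
      if PySem.List.pyGetD (PySem.List.pyGetD matrix i []) j 0 = 0 then
        directions.foldl (fun acc d =>
          let ni := i + d.1
          let nj := j + d.2
          if 0 ≤ ni ∧ ni < n ∧ 0 ≤ nj ∧ nj < m ∧
              PySem.List.pyGetD (PySem.List.pyGetD matrix ni []) nj 0 = 1 then
            acc + 1
          else acc) acc
      else acc) acc) 0

-- ===== PORT B =====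
def sumOfCoverage_alt (matrix : List (List Int)) : Int :=
  let n : Int := matrix.length
  let m : Int := if n > 0 then ((PySem.List.pyGetD matrix 0 []).length : Int) else 0
  (PySem.List.pyRange 0 n 1).foldl (fun acc i =>
    (PySem.List.pyRange 0 m 1).foldl (fun acc j =>
      let a := PySem.List.pyGetD (PySem.List.pyGetD matrix i []) j 0
      let acc :=
        if j + 1 < m ∧
            (let b := PySem.List.pyGetD (PySem.List.pyGetD matrix i []) (j + 1) 0
             (a = 0 ∧ b = 1) ∨ (a = 1 ∧ b = 0)) then
          acc + 1
        else acc
      if i + 1 < n ∧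
          (let b := PySem.List.pyGetD (PySem.List.pyGetD matrix (i + 1) []) j 0
           (a = 0 ∧ b = 1) ∨ (a = 1 ∧ b = 0)) then
        acc + 1
      else acc) acc) 0

-- ===== PRECONDITION & SPEC =====
-- Pre_ excludes exactly the ragged matrices on which the Python A raises IndexError
-- (some row shorter than the first row); A returns normally on everything else.
def Pre_sumOfCoverage (matrix : List (List Int)) : Prop :=
  ∀ row ∈ matrix, (matrix.getD 0 []).length ≤ row.length
instance (matrix : List (List Int)) : Decidable (Pre_sumOfCoverage matrix) := by
  unfold Pre_sumOfCoverage; infer_instance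
def pvWitness_sumOfCoverage : List (List Int) := [[0, 1], [1, 0]]

def Spec_sumOfCoverage (matrix : List (List Int)) (out : Int) : Prop := out = sumOfCoverage_alt matrix
instance (matrix : List (List Int)) (out : Int) : Decidable (Spec_sumOfCoverage matrix out) := by unfold Spec_sumOfCoverage; infer_instance

-- ===== CLAIM (what is proved, stated in full; the proofs are below) =====
def Claim_equal_sumOfCoverage : Prop := ∀ (matrix : List (List Int)), Dom_sumOfCoverage matrix → Pre_sumOfCoverage matrix → Spec_sumOfCoverage matrix (sumOfCoverage matrix)

-- ===== LEMMAS AND PROOFS =====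

-- value of the (virtual) cell (i, j); out-of-range reads give the ports' defaults
def pvCell (t : List (List Int)) (i j : Nat) : Int := (t.getD i []).getD j 0

def pvInd (p : Prop) [Decidable p] : Int := if p then 1 else 0

-- A's per-cell contribution, in pure Nat form
def pvCA (t : List (List Int)) (N M i j : Nat) : Int :=
  pvInd (pvCell t i j = 0 ∧ 1 ≤ i ∧ pvCell t (i - 1) j = 1)
  + pvInd (pvCell t i j = 0 ∧ i + 1 < N ∧ pvCell t (i + 1) j = 1)
  + pvInd (pvCell t i j = 0 ∧ 1 ≤ j ∧ pvCell t i (j - 1) = 1)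
  + pvInd (pvCell t i j = 0 ∧ j + 1 < M ∧ pvCell t i (j + 1) = 1)

-- B's per-cell contribution, in pure Nat form
def pvCB (t : List (List Int)) (N M i j : Nat) : Int :=
  pvInd (j + 1 < M ∧ ((pvCell t i j = 0 ∧ pvCell t i (j + 1) = 1) ∨ (pvCell t i j = 1 ∧ pvCell t i (j + 1) = 0)))
  + pvInd (i + 1 < N ∧ ((pvCell t i j = 0 ∧ pvCell t (i + 1) j = 1) ∨ (pvCell t i j = 1 ∧ pvCell t (i + 1) j = 0)))

lemma pvInd_congr {p q : Prop} [Decidable p] [Decidable q] (h : p ↔ q) : pvInd p = pvInd q := by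
  simp [pvInd, h]

lemma pvFoldl_shift {α : Type} (h : Int → α → Int) (f : α → Int)
    (hf : ∀ acc x, h acc x = acc + f x) :
    ∀ (l : List α) (a : Int), l.foldl h a = a + (l.map f).sum := by
  intro l
  induction l with
  | nil => intro a; simp
  | cons x xs ih => intro a; simp [List.foldl, hf, ih, add_assoc]

lemma pvSum_range {f : Nat → Int} {n : Nat} :
    ((List.range n).map f).sum = ∑ i ∈ Finset.range n, f i := by
  induction n with
  | zero => simp
  | succ k ih => simp [List.range_succ, Finset.sum_range_succ, ih]

-- shifting a "looks at the predecessor" sum into a "looks at the successor" sum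
lemma pvSum_shift (N : Nat) (Q : Nat → Nat → Prop) [∀ a b, Decidable (Q a b)] :
    ∑ i ∈ Finset.range N, pvInd (1 ≤ i ∧ Q (i - 1) i)
      = ∑ i ∈ Finset.range N, pvInd (i + 1 < N ∧ Q i (i + 1)) := by
  cases N with
  | zero => simp
  | succ K =>
    rw [Finset.sum_range_succ' (fun i => pvInd (1 ≤ i ∧ Q (i - 1) i)) K]
    rw [Finset.sum_range_succ (fun i => pvInd (i + 1 < K + 1 ∧ Q i (i + 1))) K]
    have h0 : pvInd (1 ≤ 0 ∧ Q (0 - 1) 0) = 0 := by simp [pvInd]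
    have hK : pvInd (K + 1 < K + 1 ∧ Q K (K + 1)) = 0 := by simp [pvInd]
    rw [h0, hK, add_zero, add_zero]
    apply Finset.sum_congr rfl
    intro i hi
    have hiK : i < K := Finset.mem_range.mp hi
    apply pvInd_congr
    constructor
    · rintro ⟨_, hq⟩; exact ⟨by omega, by simpa using hq⟩
    · rintro ⟨_, hq⟩; exact ⟨by omega, by simpa using hq⟩

-- merging the two directed indicators of one edge into the undirected indicator
lemma pvInd_edge (c : Prop) [Decidable c] (a b : Int) :
    pvInd (c ∧ a = 0 ∧ b = 1) + pvInd (c ∧ b = 0 ∧ a = 1)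
      = pvInd (c ∧ ((a = 0 ∧ b = 1) ∨ (a = 1 ∧ b = 0))) := by
  by_cases hc : c <;> by_cases h1 : a = 0 ∧ b = 1 <;> by_cases h2 : b = 0 ∧ a = 1 <;>
    simp [pvInd, hc, h1, h2] <;> omega

-- the combinatorial core: A's 4-direction census equals B's edge census
lemma pvCore (t : List (List Int)) (N M : Nat) :
    (∑ i ∈ Finset.range N, ∑ j ∈ Finset.range M, pvCA t N M i j)
      = ∑ i ∈ Finset.range N, ∑ j ∈ Finset.range M, pvCB t N M i j := by
  have hrow : ∀ i,
      (∑ j ∈ Finset.range M, pvInd (pvCell t i j = 0 ∧ 1 ≤ j ∧ pvCell t i (j - 1) = 1))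
        = ∑ j ∈ Finset.range M, pvInd (j + 1 < M ∧ pvCell t i (j + 1) = 0 ∧ pvCell t i j = 1) := by
    intro i
    have hs := pvSum_shift M (fun a b => pvCell t i b = 0 ∧ pvCell t i a = 1)
    calc (∑ j ∈ Finset.range M, pvInd (pvCell t i j = 0 ∧ 1 ≤ j ∧ pvCell t i (j - 1) = 1))
        = ∑ j ∈ Finset.range M, pvInd (1 ≤ j ∧ pvCell t i j = 0 ∧ pvCell t i (j - 1) = 1) := by
          exact Finset.sum_congr rfl (fun j _ => pvInd_congr (by tauto))
      _ = ∑ j ∈ Finset.range M, pvInd (j + 1 < M ∧ pvCell t i (j + 1) = 0 ∧ pvCell t i j = 1) := hs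
  have hcol :
      (∑ i ∈ Finset.range N, ∑ j ∈ Finset.range M, pvInd (pvCell t i j = 0 ∧ 1 ≤ i ∧ pvCell t (i - 1) j = 1))
        = ∑ i ∈ Finset.range N, ∑ j ∈ Finset.range M, pvInd (i + 1 < N ∧ pvCell t (i + 1) j = 0 ∧ pvCell t i j = 1) := by
    rw [Finset.sum_comm, Finset.sum_comm (s := Finset.range N)]
    refine Finset.sum_congr rfl (fun j _ => ?_)
    have hs := pvSum_shift N (fun a b => pvCell t b j = 0 ∧ pvCell t a j = 1)
    calc (∑ i ∈ Finset.range N, pvInd (pvCell t i j = 0 ∧ 1 ≤ i ∧ pvCell t (i - 1) j = 1))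
        = ∑ i ∈ Finset.range N, pvInd (1 ≤ i ∧ pvCell t i j = 0 ∧ pvCell t (i - 1) j = 1) := by
          exact Finset.sum_congr rfl (fun i _ => pvInd_congr (by tauto))
      _ = ∑ i ∈ Finset.range N, pvInd (i + 1 < N ∧ pvCell t (i + 1) j = 0 ∧ pvCell t i j = 1) := hs
  calc (∑ i ∈ Finset.range N, ∑ j ∈ Finset.range M, pvCA t N M i j)
      = (∑ i ∈ Finset.range N, ∑ j ∈ Finset.range M, pvInd (pvCell t i j = 0 ∧ 1 ≤ i ∧ pvCell t (i - 1) j = 1))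
        + (∑ i ∈ Finset.range N, ∑ j ∈ Finset.range M, pvInd (pvCell t i j = 0 ∧ i + 1 < N ∧ pvCell t (i + 1) j = 1))
        + ((∑ i ∈ Finset.range N, ∑ j ∈ Finset.range M, pvInd (pvCell t i j = 0 ∧ 1 ≤ j ∧ pvCell t i (j - 1) = 1))
        + (∑ i ∈ Finset.range N, ∑ j ∈ Finset.range M, pvInd (pvCell t i j = 0 ∧ j + 1 < M ∧ pvCell t i (j + 1) = 1))) := by
        simp only [pvCA, Finset.sum_add_distrib]; ring
    _ = (∑ i ∈ Finset.range N, ∑ j ∈ Finset.range M, pvInd (i + 1 < N ∧ pvCell t (i + 1) j = 0 ∧ pvCell t i j = 1))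
        + (∑ i ∈ Finset.range N, ∑ j ∈ Finset.range M, pvInd (pvCell t i j = 0 ∧ i + 1 < N ∧ pvCell t (i + 1) j = 1))
        + ((∑ i ∈ Finset.range N, ∑ j ∈ Finset.range M, pvInd (j + 1 < M ∧ pvCell t i (j + 1) = 0 ∧ pvCell t i j = 1))
        + (∑ i ∈ Finset.range N, ∑ j ∈ Finset.range M, pvInd (pvCell t i j = 0 ∧ j + 1 < M ∧ pvCell t i (j + 1) = 1))) := by
        rw [hcol, Finset.sum_congr rfl (fun i _ => hrow i)]
    _ = ∑ i ∈ Finset.range N, ∑ j ∈ Finset.range M,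
          (pvInd (i + 1 < N ∧ pvCell t (i + 1) j = 0 ∧ pvCell t i j = 1)
           + pvInd (pvCell t i j = 0 ∧ i + 1 < N ∧ pvCell t (i + 1) j = 1)
           + (pvInd (j + 1 < M ∧ pvCell t i (j + 1) = 0 ∧ pvCell t i j = 1)
           + pvInd (pvCell t i j = 0 ∧ j + 1 < M ∧ pvCell t i (j + 1) = 1))) := by
        simp only [← Finset.sum_add_distrib]
    _ = ∑ i ∈ Finset.range N, ∑ j ∈ Finset.range M, pvCB t N M i j := by
        refine Finset.sum_congr rfl (fun i _ => Finset.sum_congr rfl (fun j _ => ?_))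
        have hv := pvInd_edge (i + 1 < N) (pvCell t i j) (pvCell t (i + 1) j)
        have hh := pvInd_edge (j + 1 < M) (pvCell t i j) (pvCell t i (j + 1))
        have hv1 : pvInd (pvCell t i j = 0 ∧ i + 1 < N ∧ pvCell t (i + 1) j = 1)
            = pvInd ((i + 1 < N) ∧ pvCell t i j = 0 ∧ pvCell t (i + 1) j = 1) := pvInd_congr (by tauto)
        have hv2 : pvInd (i + 1 < N ∧ pvCell t (i + 1) j = 0 ∧ pvCell t i j = 1)
            = pvInd ((i + 1 < N) ∧ pvCell t (i + 1) j = 0 ∧ pvCell t i j = 1) := pvInd_congr (by tauto)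
        have hh1 : pvInd (pvCell t i j = 0 ∧ j + 1 < M ∧ pvCell t i (j + 1) = 1)
            = pvInd ((j + 1 < M) ∧ pvCell t i j = 0 ∧ pvCell t i (j + 1) = 1) := pvInd_congr (by tauto)
        have hh2 : pvInd (j + 1 < M ∧ pvCell t i (j + 1) = 0 ∧ pvCell t i j = 1)
            = pvInd ((j + 1 < M) ∧ pvCell t i (j + 1) = 0 ∧ pvCell t i j = 1) := pvInd_congr (by tauto)
        unfold pvCB
        linear_combination hv1 + hv2 + hh1 + hh2 + hv + hh

lemma pvFoldl_sum {α : Type} (l : List α) (h : Int → α → Int) (f : α → Int) (a : Int)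
    (hf : ∀ acc x, h acc x = acc + f x) : l.foldl h a = a + (l.map f).sum :=
  pvFoldl_shift h f hf l a

lemma pvGetCast (t : List (List Int)) (a b : Nat) :
    PySem.List.pyGetD (PySem.List.pyGetD t (a : Int) []) (b : Int) 0 = pvCell t a b := by
  simp [pvCell, PySem.List.pyGetD_natCast]

lemma pvGetCast' (t : List (List Int)) (x y : Int) (a b : Nat) (hx : x = (a : Int))
    (hy : y = (b : Int)) : PySem.List.pyGetD (PySem.List.pyGetD t x []) y 0 = pvCell t a b := by
  rw [hx, hy]; exact pvGetCast t a b

lemma pvIf_step (acc : Int) (p : Prop) [Decidable p] : (if p then acc + 1 else acc) = acc + pvInd p := by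
  unfold pvInd; split_ifs <;> ring

lemma pvMapRange (N : Nat) (f : Int → Int) :
    ((PySem.List.pyRange 0 (N : Int) 1).map f).sum = ∑ k ∈ Finset.range N, f (k : Int) := by
  rw [PySem.List.pyRange_one, List.map_map, pvSum_range]
  rw [show (((N : Int)) - 0).toNat = N by omega]
  exact Finset.sum_congr rfl (fun k _ => by simp)

-- A's per-cell contribution with Int coordinates, exactly as the port computes it
def pvCAInt (t : List (List Int)) (n m i j : Int) : Int :=
  pvInd (PySem.List.pyGetD (PySem.List.pyGetD t i []) j 0 = 0 ∧
    (0 ≤ i + -1 ∧ i + -1 < n ∧ 0 ≤ j + 0 ∧ j + 0 < m ∧ PySem.List.pyGetD (PySem.List.pyGetD t (i + -1) []) (j + 0) 0 = 1))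
  + pvInd (PySem.List.pyGetD (PySem.List.pyGetD t i []) j 0 = 0 ∧
    (0 ≤ i + 1 ∧ i + 1 < n ∧ 0 ≤ j + 0 ∧ j + 0 < m ∧ PySem.List.pyGetD (PySem.List.pyGetD t (i + 1) []) (j + 0) 0 = 1))
  + pvInd (PySem.List.pyGetD (PySem.List.pyGetD t i []) j 0 = 0 ∧
    (0 ≤ i + 0 ∧ i + 0 < n ∧ 0 ≤ j + -1 ∧ j + -1 < m ∧ PySem.List.pyGetD (PySem.List.pyGetD t (i + 0) []) (j + -1) 0 = 1))
  + pvInd (PySem.List.pyGetD (PySem.List.pyGetD t i []) j 0 = 0 ∧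
    (0 ≤ i + 0 ∧ i + 0 < n ∧ 0 ≤ j + 1 ∧ j + 1 < m ∧ PySem.List.pyGetD (PySem.List.pyGetD t (i + 0) []) (j + 1) 0 = 1))

-- B's per-cell contribution with Int coordinates, exactly as the port computes it
def pvCBInt (t : List (List Int)) (n m i j : Int) : Int :=
  pvInd (j + 1 < m ∧
    ((PySem.List.pyGetD (PySem.List.pyGetD t i []) j 0 = 0 ∧ PySem.List.pyGetD (PySem.List.pyGetD t i []) (j + 1) 0 = 1)
     ∨ (PySem.List.pyGetD (PySem.List.pyGetD t i []) j 0 = 1 ∧ PySem.List.pyGetD (PySem.List.pyGetD t i []) (j + 1) 0 = 0)))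
  + pvInd (i + 1 < n ∧
    ((PySem.List.pyGetD (PySem.List.pyGetD t i []) j 0 = 0 ∧ PySem.List.pyGetD (PySem.List.pyGetD t (i + 1) []) j 0 = 1)
     ∨ (PySem.List.pyGetD (PySem.List.pyGetD t i []) j 0 = 1 ∧ PySem.List.pyGetD (PySem.List.pyGetD t (i + 1) []) j 0 = 0)))

lemma pvA_step1 (t : List (List Int)) (n m : Int) (hn : n = (t.length : Int))
    (hm : m = if n > 0 then ((PySem.List.pyGetD t 0 []).length : Int) else 0) :
    sumOfCoverage t
      = ((PySem.List.pyRange 0 n 1).map (fun i =>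
          ((PySem.List.pyRange 0 m 1).map (fun j => pvCAInt t n m i j)).sum)).sum := by
  simp only [sumOfCoverage, ← hn, ← hm]
  rw [pvFoldl_sum _ _ (fun i => ((PySem.List.pyRange 0 m 1).map (fun j => pvCAInt t n m i j)).sum)]
  · simp
  · intro acc i
    rw [pvFoldl_sum _ _ (fun j => pvCAInt t n m i j)]
    intro acc j
    simp only [List.foldl_cons, List.foldl_nil, pvIf_step, pvCAInt]
    by_cases h0 : PySem.List.pyGetD (PySem.List.pyGetD t i []) j 0 = 0 <;>
      simp [h0, pvInd] <;> ring

lemma pvB_step1 (t : List (List Int)) (n m : Int) (hn : n = (t.length : Int))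
    (hm : m = if n > 0 then ((PySem.List.pyGetD t 0 []).length : Int) else 0) :
    sumOfCoverage_alt t
      = ((PySem.List.pyRange 0 n 1).map (fun i =>
          ((PySem.List.pyRange 0 m 1).map (fun j => pvCBInt t n m i j)).sum)).sum := by
  simp only [sumOfCoverage_alt, ← hn, ← hm]
  rw [pvFoldl_sum _ _ (fun i => ((PySem.List.pyRange 0 m 1).map (fun j => pvCBInt t n m i j)).sum)]
  · simp
  · intro acc i
    rw [pvFoldl_sum _ _ (fun j => pvCBInt t n m i j)]
    intro acc j
    simp only [pvIf_step, pvCBInt]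
    ring

lemma pvCAInt_cast (t : List (List Int)) (N M i j : Nat) (hi : i < N) (hj : j < M) :
    pvCAInt t (N : Int) (M : Int) (i : Int) (j : Int) = pvCA t N M i j := by
  unfold pvCAInt pvCA
  have e1 : pvInd ((PySem.List.pyGetD (PySem.List.pyGetD t (i : Int) []) (j : Int) 0 = 0) ∧
      (0 ≤ (i : Int) + -1 ∧ (i : Int) + -1 < (N : Int) ∧ 0 ≤ (j : Int) + 0 ∧ (j : Int) + 0 < (M : Int) ∧
        PySem.List.pyGetD (PySem.List.pyGetD t ((i : Int) + -1) []) ((j : Int) + 0) 0 = 1))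
      = pvInd (pvCell t i j = 0 ∧ 1 ≤ i ∧ pvCell t (i - 1) j = 1) := by
    by_cases hb : 1 ≤ i
    · rw [pvGetCast, pvGetCast' t _ _ (i - 1) j (by omega) (by omega)]
      apply pvInd_congr
      constructor
      · rintro ⟨h0, -, -, -, -, h5⟩; exact ⟨h0, hb, h5⟩
      · rintro ⟨h0, -, h5⟩; exact ⟨h0, by omega, by omega, by omega, by omega, h5⟩
    · apply pvInd_congr
      constructor
      · rintro ⟨-, h1, -⟩; exact absurd (by omega : 1 ≤ i) hb
      · rintro ⟨-, h1, -⟩; exact absurd h1 hb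
  have e2 : pvInd ((PySem.List.pyGetD (PySem.List.pyGetD t (i : Int) []) (j : Int) 0 = 0) ∧
      (0 ≤ (i : Int) + 1 ∧ (i : Int) + 1 < (N : Int) ∧ 0 ≤ (j : Int) + 0 ∧ (j : Int) + 0 < (M : Int) ∧
        PySem.List.pyGetD (PySem.List.pyGetD t ((i : Int) + 1) []) ((j : Int) + 0) 0 = 1))
      = pvInd (pvCell t i j = 0 ∧ i + 1 < N ∧ pvCell t (i + 1) j = 1) := by
    rw [pvGetCast, pvGetCast' t _ _ (i + 1) j (by omega) (by omega)]
    apply pvInd_congr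
    constructor
    · rintro ⟨h0, -, h2, -, -, h5⟩; exact ⟨h0, by omega, h5⟩
    · rintro ⟨h0, h2, h5⟩; exact ⟨h0, by omega, by omega, by omega, by omega, h5⟩
  have e3 : pvInd ((PySem.List.pyGetD (PySem.List.pyGetD t (i : Int) []) (j : Int) 0 = 0) ∧
      (0 ≤ (i : Int) + 0 ∧ (i : Int) + 0 < (N : Int) ∧ 0 ≤ (j : Int) + -1 ∧ (j : Int) + -1 < (M : Int) ∧
        PySem.List.pyGetD (PySem.List.pyGetD t ((i : Int) + 0) []) ((j : Int) + -1) 0 = 1))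
      = pvInd (pvCell t i j = 0 ∧ 1 ≤ j ∧ pvCell t i (j - 1) = 1) := by
    by_cases hb : 1 ≤ j
    · rw [pvGetCast, pvGetCast' t _ _ i (j - 1) (by omega) (by omega)]
      apply pvInd_congr
      constructor
      · rintro ⟨h0, -, -, -, -, h5⟩; exact ⟨h0, hb, h5⟩
      · rintro ⟨h0, -, h5⟩; exact ⟨h0, by omega, by omega, by omega, by omega, h5⟩
    · apply pvInd_congr
      constructor
      · rintro ⟨-, -, -, h3, -⟩; exact absurd (by omega : 1 ≤ j) hb
      · rintro ⟨-, h1, -⟩; exact absurd h1 hb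
  have e4 : pvInd ((PySem.List.pyGetD (PySem.List.pyGetD t (i : Int) []) (j : Int) 0 = 0) ∧
      (0 ≤ (i : Int) + 0 ∧ (i : Int) + 0 < (N : Int) ∧ 0 ≤ (j : Int) + 1 ∧ (j : Int) + 1 < (M : Int) ∧
        PySem.List.pyGetD (PySem.List.pyGetD t ((i : Int) + 0) []) ((j : Int) + 1) 0 = 1))
      = pvInd (pvCell t i j = 0 ∧ j + 1 < M ∧ pvCell t i (j + 1) = 1) := by
    rw [pvGetCast, pvGetCast' t _ _ i (j + 1) (by omega) (by omega)]
    apply pvInd_congr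
    constructor
    · rintro ⟨h0, -, -, -, h4, h5⟩; exact ⟨h0, by omega, h5⟩
    · rintro ⟨h0, h4, h5⟩; exact ⟨h0, by omega, by omega, by omega, by omega, h5⟩
  rw [e1, e2, e3, e4]

lemma pvCBInt_cast (t : List (List Int)) (N M i j : Nat) (hi : i < N) (hj : j < M) :
    pvCBInt t (N : Int) (M : Int) (i : Int) (j : Int) = pvCB t N M i j := by
  unfold pvCBInt pvCB
  rw [pvGetCast, pvGetCast' t _ _ i (j + 1) (by omega) (by omega),
      pvGetCast' t _ _ (i + 1) j (by omega) (by omega)]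
  have e1 : ((j : Int) + 1 < (M : Int)) ↔ (j + 1 < M) := by omega
  have e2 : ((i : Int) + 1 < (N : Int)) ↔ (i + 1 < N) := by omega
  rw [pvInd_congr (and_congr_left' e1), pvInd_congr (and_congr_left' e2)]

lemma pvA_eq_sum (t : List (List Int)) :
    sumOfCoverage t
      = ∑ i ∈ Finset.range t.length, ∑ j ∈ Finset.range (t.getD 0 []).length,
          pvCA t t.length (t.getD 0 []).length i j := by
  rcases Nat.eq_zero_or_pos t.length with h0 | hpos
  · rw [List.length_eq_zero_iff.mp h0]
    simp [sumOfCoverage, PySem.List.pyRange_one_eq_nil]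
  · rw [pvA_step1 t (t.length : Int) ((t.getD 0 []).length : Int) rfl
      (by rw [if_pos (by omega), PySem.List.pyGetD_zero])]
    rw [pvMapRange]
    refine Finset.sum_congr rfl (fun i hi => ?_)
    rw [pvMapRange]
    exact Finset.sum_congr rfl (fun j hj =>
      pvCAInt_cast t _ _ i j (Finset.mem_range.mp hi) (Finset.mem_range.mp hj))

lemma pvB_eq_sum (t : List (List Int)) :
    sumOfCoverage_alt t
      = ∑ i ∈ Finset.range t.length, ∑ j ∈ Finset.range (t.getD 0 []).length,
          pvCB t t.length (t.getD 0 []).length i j := by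
  rcases Nat.eq_zero_or_pos t.length with h0 | hpos
  · rw [List.length_eq_zero_iff.mp h0]
    simp [sumOfCoverage_alt, PySem.List.pyRange_one_eq_nil]
  · rw [pvB_step1 t (t.length : Int) ((t.getD 0 []).length : Int) rfl
      (by rw [if_pos (by omega), PySem.List.pyGetD_zero])]
    rw [pvMapRange]
    refine Finset.sum_congr rfl (fun i hi => ?_)
    rw [pvMapRange]
    exact Finset.sum_congr rfl (fun j hj =>
      pvCBInt_cast t _ _ i j (Finset.mem_range.mp hi) (Finset.mem_range.mp hj))

-- ===== VERDICT (by name: the statement is the Claim_ definition above) =====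
theorem sumOfCoverage_spec : Claim_equal_sumOfCoverage := by
  intro matrix _ _
  unfold Spec_sumOfCoverage
  rw [pvA_eq_sum, pvB_eq_sum, pvCore]
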